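-- pv_equiv track=rewrite | github.com/deccatree3/kat-outbound-hub | outputs/packing/boxes.py | split_to_inboxes
-- ===== SOURCE A (Python) =====
-- from typing import Dict, List, Optional, Tuple
--
-- def split_to_inboxes(qty: int) -> List[Tuple[str, int]]:
--     """qty 개의 에이지샷을 인박스로 분할. [(인박스종류, 담은 수량), ...] 반환.
--     규칙: 1~3개 → 에이지샷 1호 / 4~10개 → 위오 1호. 11+ 면 위 규칙을 반복(분할).
--     """
--     out: List[Tuple[str, int]] = []
--     remaining = int(qty or 0)
--     while remaining > 0:
--         if remaining >= 4:
--             n = min(10, remaining)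
--             out.append(('위오 1호', n))
--         else:
--             n = min(3, remaining)
--             out.append(('에이지샷 1호', n))
--         remaining -= n
--     return out
-- ===== SOURCE B (Python) =====
-- from typing import List, Tuple
--
-- def split_to_inboxes(qty: int) -> List[Tuple[str, int]]:
--     n = int(qty or 0)
--     if n <= 0:
--         return []
--     full, r = divmod(n, 10)
--     out = [('위오 1호', 10)] * full
--     if r >= 4:
--         out.append(('위오 1호', r))
--     elif r >= 1:
--         out.append(('에이지샷 1호', r))
--     return out
-- ===== Notes on version B (the rewrite author's own statement) =====
-- stated objective: faster
-- what changed: Replaces the repeated-subtraction while loop with closed-form divmod arithmetic: full tens become replicated ('위오 1호', 10) boxes and one final box is chosen by the remainder's threshold.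
import Mathlib
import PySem

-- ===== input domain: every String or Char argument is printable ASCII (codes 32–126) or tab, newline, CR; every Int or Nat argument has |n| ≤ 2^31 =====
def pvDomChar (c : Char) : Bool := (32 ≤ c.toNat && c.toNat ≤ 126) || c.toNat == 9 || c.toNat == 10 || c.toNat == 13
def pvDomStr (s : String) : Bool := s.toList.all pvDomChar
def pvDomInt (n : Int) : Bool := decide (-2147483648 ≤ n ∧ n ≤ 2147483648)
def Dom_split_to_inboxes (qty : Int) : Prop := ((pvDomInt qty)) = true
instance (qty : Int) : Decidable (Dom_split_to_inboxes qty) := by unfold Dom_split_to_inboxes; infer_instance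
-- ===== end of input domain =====

-- B replaces A's repeated-subtraction loop with closed-form divmod arithmetic (objective: faster, constant factor).

-- ===== PORT A =====
-- the while loop: while remaining > 0: take min(10,·) as '위오 1호' if remaining ≥ 4 else min(3,·) as '에이지샷 1호'
def splitLoopA (remaining : Int) : List (String × Int) :=
  if h : remaining > 0 then
    if remaining ≥ 4 then
      let n := min 10 remaining
      ("위오 1호", n) :: splitLoopA (remaining - n)
    else
      let n := min 3 remaining
      ("에이지샷 1호", n) :: splitLoopA (remaining - n)
  else []
termination_by remaining.toNat
decreasing_by
  · simp only [min_def]; split <;> omega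
  · simp only [min_def]; split <;> omega

-- int(qty or 0) = qty for an int argument (0 or 0 → 0 = qty)
def split_to_inboxes (qty : Int) : List (String × Int) :=
  splitLoopA qty

-- ===== PORT B =====
def split_to_inboxes_alt (qty : Int) : List (String × Int) :=
  let n := qty
  if n ≤ 0 then []
  else
    let full := PySem.Int.floordiv n 10
    let r := PySem.Int.mod n 10
    let out := List.replicate full.toNat ("위오 1호", (10 : Int))
    if r ≥ 4 then out ++ [("위오 1호", r)]
    else if r ≥ 1 then out ++ [("에이지샷 1호", r)]
    else out

-- ===== PRECONDITION & SPEC =====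
def Spec_split_to_inboxes (qty : Int) (out : List (String × Int)) : Prop := out = split_to_inboxes_alt qty
instance (qty : Int) (out : List (String × Int)) : Decidable (Spec_split_to_inboxes qty out) := by unfold Spec_split_to_inboxes; infer_instance

-- ===== CLAIM (what is proved, stated in full; the proofs are below) =====
def Claim_equal_split_to_inboxes : Prop := ∀ (qty : Int), Dom_split_to_inboxes qty → Spec_split_to_inboxes qty (split_to_inboxes qty)

-- ===== LEMMAS AND PROOFS =====

lemma alt_step (q : Int) (h : q ≥ 10) :
    split_to_inboxes_alt q = ("위오 1호", 10) :: split_to_inboxes_alt (q - 10) := by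
  have h10 : (0:Int) < 10 := by norm_num
  simp only [split_to_inboxes_alt, PySem.Int.floordiv_eq_ediv_of_pos h10,
    PySem.Int.mod_eq_emod_of_pos h10]
  have hq : ¬ q ≤ 0 := by omega
  have hdiv : q / 10 = (q - 10) / 10 + 1 := by omega
  have hmod : q % 10 = (q - 10) % 10 := by omega
  by_cases h0 : q - 10 ≤ 0
  · -- q = 10
    have : q = 10 := by omega
    subst this
    norm_num
  · simp only [hq, if_false, h0, if_false, hdiv, hmod]
    have htn : ((q - 10) / 10 + 1).toNat = ((q - 10) / 10).toNat + 1 := by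
      have : 0 ≤ (q - 10) / 10 := Int.ediv_nonneg (by omega) (by norm_num)
      omega
    rw [htn, List.replicate_succ]
    split_ifs <;> simp

lemma main_lemma : ∀ (k : Nat) (q : Int), q.toNat ≤ k → splitLoopA q = split_to_inboxes_alt q := by
  intro k
  induction k with
  | zero =>
    intro q hq
    have h0 : q ≤ 0 := by omega
    rw [splitLoopA]
    simp [split_to_inboxes_alt, h0, show ¬ q > 0 by omega]
  | succ k ih =>
    intro q hq
    by_cases h0 : q ≤ 0
    · rw [splitLoopA]; simp [split_to_inboxes_alt, h0, show ¬ q > 0 by omega]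
    · by_cases h10 : q ≥ 10
      · rw [splitLoopA, alt_step q h10, dif_pos (show q > 0 by omega),
          if_pos (show q ≥ 4 by omega)]
        have hmin : min (10:Int) q = 10 := by omega
        simp only [hmin]
        congr 1
        exact ih (q - 10) (by omega)
      · -- 1 ≤ q ≤ 9 : one final box, loop terminates after it
        have h10' : (0:Int) < 10 := by norm_num
        have hdiv : q / 10 = 0 := by omega
        have hmod : q % 10 = q := by omega
        rw [splitLoopA]
        simp only [split_to_inboxes_alt, PySem.Int.floordiv_eq_ediv_of_pos h10',
          PySem.Int.mod_eq_emod_of_pos h10', hdiv, hmod, h0, if_false]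
        rw [dif_pos (show q > 0 by omega)]
        by_cases h4 : q ≥ 4
        · have hmin : min (10:Int) q = q := by omega
          rw [if_pos h4]
          simp only [hmin, sub_self]
          rw [splitLoopA]
          simp [show (4:Int) ≤ q from h4]
        · have hmin : min (3:Int) q = q := by omega
          rw [if_neg h4]
          simp only [hmin, sub_self]
          rw [splitLoopA]
          simp [show ¬ (4:Int) ≤ q by omega, show (1:Int) ≤ q by omega]

-- ===== VERDICT (by name: the statement is the Claim_ definition above) =====
theorem split_to_inboxes_spec : Claim_equal_split_to_inboxes := by
  intro qty _
  unfold Spec_split_to_inboxes split_to_inboxes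
  exact main_lemma qty.toNat qty le_rfl
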